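-- pv_equiv track=rewrite | github.com/ythepaut/advent-of-code-2022 | solutions/day1.py | elf_with_max_calories
-- ===== SOURCE A (Python) =====
-- def elf_with_max_calories(elves: list[list[int]]) -> int:
--     """Returns the index of the elf carrying the most snacks"""
--     assert len(elves) > 0
--     max_calories: int = sum(elves[0])
--     best_elf_index: int = 0
--     for index, elf in enumerate(elves[1:]):
--         calories: int = sum(elf)
--         if calories > max_calories:
--             max_calories = calories
--             best_elf_index = index + 1
--     return best_elf_index
-- ===== SOURCE B (Python) =====
-- def elf_with_max_calories(elves: list[list[int]]) -> int:
--     """Returns the index of the elf carrying the most snacks"""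
--     assert len(elves) > 0
--     totals = [sum(elf) for elf in elves]
--     return totals.index(max(totals))
-- ===== Notes on version B (the rewrite author's own statement) =====
-- stated objective: simpler
-- what changed: Replaces the hand-rolled running-max/best-index loop over enumerate(elves[1:]) with a precomputed totals table, max(), and list.index() (first match preserves A's tie-breaking).
import Mathlib
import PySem

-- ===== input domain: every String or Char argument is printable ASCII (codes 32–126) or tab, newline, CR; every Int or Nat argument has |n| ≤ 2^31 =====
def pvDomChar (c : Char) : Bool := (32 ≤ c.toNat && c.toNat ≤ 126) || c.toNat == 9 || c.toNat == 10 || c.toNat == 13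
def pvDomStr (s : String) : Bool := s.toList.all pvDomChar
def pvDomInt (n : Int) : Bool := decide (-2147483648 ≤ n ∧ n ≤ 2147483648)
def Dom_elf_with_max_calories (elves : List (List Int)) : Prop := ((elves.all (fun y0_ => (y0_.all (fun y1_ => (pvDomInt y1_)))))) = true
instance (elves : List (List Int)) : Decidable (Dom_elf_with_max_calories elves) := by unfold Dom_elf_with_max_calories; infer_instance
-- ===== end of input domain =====

-- B replaces A's running-max/best-index loop with a totals table, max(), and first-match index() (simpler decomposition, same cost).

-- ===== PORT A =====
-- A's running-max loop over enumerate(elves[1:]); the [] case is unreachable (assert), excluded by Pre_.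
def elf_with_max_calories (elves : List (List Int)) : Int :=
  match elves with
  | [] => 0
  | e0 :: rest =>
    ((PySem.List.enumerate rest 0).foldl
      (fun (st : Int × Int) (p : Int × List Int) =>
        if p.2.sum > st.1 then (p.2.sum, p.1 + 1) else st)
      (e0.sum, 0)).2

-- ===== PORT B =====
def elf_with_max_calories_alt (elves : List (List Int)) : Int :=
  let totals := elves.map List.sum
  match PySem.List.max? totals (fun x => x) with
  | some best =>
    match PySem.List.index? totals best with
    | some k => (k : Int)
    | none => 0
  | none => 0

-- ===== PRECONDITION & SPEC =====
-- Pre_ excludes only the empty list, on which A's `assert len(elves) > 0` raises AssertionError (B raises too).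
def Pre_elf_with_max_calories (elves : List (List Int)) : Prop := elves ≠ []
instance (elves : List (List Int)) : Decidable (Pre_elf_with_max_calories elves) := by unfold Pre_elf_with_max_calories; infer_instance
def pvWitness_elf_with_max_calories : List (List Int) := [[1, 2], [3]]
def Spec_elf_with_max_calories (elves : List (List Int)) (out : Int) : Prop := out = elf_with_max_calories_alt elves
instance (elves : List (List Int)) (out : Int) : Decidable (Spec_elf_with_max_calories elves out) := by unfold Spec_elf_with_max_calories; infer_instance

-- ===== CLAIM (what is proved, stated in full; the proofs are below) =====
def Claim_equal_elf_with_max_calories : Prop := ∀ (elves : List (List Int)), Dom_elf_with_max_calories elves → Pre_elf_with_max_calories elves → Spec_elf_with_max_calories elves (elf_with_max_calories elves)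

-- ===== LEMMAS AND PROOFS =====

-- enumerate of a mapped list
theorem pv_enumerate_map {α β : Type} (f : α → β) (xs : List α) (s : Int) :
    PySem.List.enumerate (xs.map f) s = (PySem.List.enumerate xs s).map (fun p => (p.1, f p.2)) := by
  induction xs generalizing s with
  | nil => simp [PySem.List.enumerate_nil]
  | cons x t ih => simp [PySem.List.enumerate_cons, ih]

-- loop invariant for A's fold over totals, by reverse induction
theorem pv_loop_spec (t0 : Int) (ts : List Int) :
    ∃ k : Nat,
      ((PySem.List.enumerate ts 0).foldl
        (fun (st : Int × Int) (p : Int × Int) => if p.2 > st.1 then (p.2, p.1 + 1) else st)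
        (t0, 0)) = (ts.foldl max t0, (k : Int)) ∧
      PySem.List.index? (t0 :: ts) (ts.foldl max t0) = some k := by
  induction ts using List.reverseRecOn with
  | nil =>
    exact ⟨0, by simp [PySem.List.enumerate_nil], by simp⟩
  | append_singleton ts x ih =>
    obtain ⟨k, hfold, hidx⟩ := ih
    rw [PySem.List.enumerate_append]
    simp only [List.foldl_append, hfold, PySem.List.enumerate_cons, PySem.List.enumerate_nil,
      List.foldl_cons, List.foldl_nil]
    by_cases hx : x > ts.foldl max t0
    · have hmax : max (ts.foldl max t0) x = x := max_eq_right (le_of_lt hx)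
      refine ⟨ts.length + 1, ?_, ?_⟩
      · rw [if_pos hx, hmax]
        simp
      · have hnotmem : x ∉ t0 :: ts := by
          intro hmem
          have hle : x ≤ ts.foldl max t0 := by
            rcases List.mem_cons.mp hmem with h | h
            · subst h; exact (PySem.List.le_foldl_max ts x).1
            · exact (PySem.List.le_foldl_max ts t0).2 x h
          omega
        have := PySem.List.index?_append_singleton_self (l := t0 :: ts) (c := x) hnotmem
        rw [hmax]
        simpa using this
    · have hmax : max (ts.foldl max t0) x = ts.foldl max t0 := max_eq_left (not_lt.mp hx)
      refine ⟨k, ?_, ?_⟩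
      · rw [if_neg hx, hmax]
      · have hmem : ts.foldl max t0 ∈ t0 :: ts := by
          have := PySem.List.index?_isSome_iff (xs := t0 :: ts) (v := ts.foldl max t0)
          rw [hidx] at this; simpa using this.mp rfl
        have := PySem.List.index?_append_of_mem (l := t0 :: ts) (t := [x])
          (v := ts.foldl max t0) hmem
        rw [hmax]
        rw [List.cons_append] at this
        rw [this, hidx]

theorem elf_spec_aux (e0 : List Int) (rest : List (List Int)) :
    elf_with_max_calories (e0 :: rest) = elf_with_max_calories_alt (e0 :: rest) := by
  obtain ⟨k, hfold, hidx⟩ := pv_loop_spec e0.sum (rest.map List.sum)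
  unfold elf_with_max_calories elf_with_max_calories_alt
  simp only [List.map_cons]
  rw [PySem.List.max?_id_cons]
  have hfold' :
      ((PySem.List.enumerate rest 0).foldl
        (fun (st : Int × Int) (p : Int × List Int) =>
          if p.2.sum > st.1 then (p.2.sum, p.1 + 1) else st)
        (e0.sum, 0)) = ((rest.map List.sum).foldl max e0.sum, (k : Int)) := by
    rw [← hfold, pv_enumerate_map, List.foldl_map]
  rw [hfold']
  rw [PySem.List.index?_eq_idxOf?] at hidx
  simp [hidx]

-- ===== VERDICT (by name: the statement is the Claim_ definition above) =====
theorem elf_with_max_calories_spec : Claim_equal_elf_with_max_calories := by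
  intro elves _ hpre
  match elves with
  | [] => exact absurd rfl hpre
  | e0 :: rest => exact elf_spec_aux e0 rest
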